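-- pv_equiv track=rewrite | github.com/DevMatheusMartinez/Digitalizador-de-documentos-fisicos | app/services/OCR.py | getValuesField
-- ===== SOURCE A (Python) =====
-- def getValuesField(data, fieldSelected, fieldsSelected):
--     fieldValues = []
--     hasFieldSelected = False
--     for word in data:
--         if hasFieldSelected:
--             if not word[-1] == ':' and word != fieldsSelected:
--                 fieldValues.append(word)
--             else:
--                 return fieldValues
--
--         if word == fieldSelected:
--             hasFieldSelected = True
--
--     return fieldValues
-- ===== SOURCE B (Python) =====
-- def getValuesField(data, fieldSelected, fieldsSelected):
--     # Consume a reversed work stack in two phases: pop-and-discard up to the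
--     # first marker, then pop values until a field label or the stop word.
--     stack = list(reversed(data))
--     while stack:
--         if stack.pop() == fieldSelected:
--             break
--     values = []
--     while stack:
--         w = stack[-1]
--         if w.endswith(':') or w == fieldsSelected:
--             break
--         values.append(stack.pop())
--     return values
-- ===== Notes on version B (the rewrite author's own statement) =====
-- stated objective: alternative
-- what changed: Replaces A's single flag-carrying for-loop by a destructive two-phase consumer over a reversed work stack (pop-and-discard until the marker, then pop values until a stopper), and tests the colon with str.endswith instead of word[-1], so B never raises on empty words (those inputs, where A raises IndexError, are outside Pre_).
import Mathlib
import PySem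

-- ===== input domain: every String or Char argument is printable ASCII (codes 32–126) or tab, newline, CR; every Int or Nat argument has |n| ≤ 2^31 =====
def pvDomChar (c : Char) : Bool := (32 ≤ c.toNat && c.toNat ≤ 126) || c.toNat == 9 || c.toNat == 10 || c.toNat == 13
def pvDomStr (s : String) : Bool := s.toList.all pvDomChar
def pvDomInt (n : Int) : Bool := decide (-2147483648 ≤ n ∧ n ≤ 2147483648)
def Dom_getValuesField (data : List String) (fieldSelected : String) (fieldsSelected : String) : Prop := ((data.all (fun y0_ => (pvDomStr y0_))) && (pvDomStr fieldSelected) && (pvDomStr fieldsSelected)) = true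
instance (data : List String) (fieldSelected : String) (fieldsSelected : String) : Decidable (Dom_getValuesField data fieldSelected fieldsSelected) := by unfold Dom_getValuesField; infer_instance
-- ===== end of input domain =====

-- B consumes a reversed work stack in two pop phases instead of A's flag-carrying loop; objective: alternative.
-- ===== PORT A =====
-- the for-loop over data with the hasFieldSelected flag and the fieldValues accumulator
def pvGoA (fS fsS : String) : List String → Bool → List String → List String
  | [], _, acc => acc
  | w :: rest, flag, acc =>
    if flag then
      match PySem.Str.pyGet? w (-1) with
      | none => []   -- word[-1] raises IndexError in Python here; excluded by Pre_
      | some c =>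
        if ¬ c = ':' ∧ w ≠ fsS then
          pvGoA fS fsS rest (if w = fS then true else flag) (acc ++ [w])
        else acc
    else
      pvGoA fS fsS rest (if w = fS then true else flag) acc

def getValuesField (data : List String) (fieldSelected : String) (fieldsSelected : String) : List String :=
  pvGoA fieldSelected fieldsSelected data false []

-- ===== PORT B =====
-- The Python stack is list(reversed(data)) popped from its END, so the pop order is data's
-- order; we represent the stack with its top (= Python's last element) at the list HEAD,
-- i.e. the Lean list is the mirror of the Python stack and `list(reversed(data))` is `data`.
-- phase 1: `while stack: if stack.pop() == fieldSelected: break` — returns the remaining stack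
def pvSeekB (fS : String) : List String → List String
  | [] => []
  | w :: rest => if w = fS then rest else pvSeekB fS rest

-- phase 2: `while stack: w = stack[-1]; if w.endswith(':') or w == fieldsSelected: break; values.append(stack.pop())`
def pvPopB (fsS : String) : List String → List String
  | [] => []
  | w :: rest => if PySem.Str.endswith w ":" ∨ w = fsS then [] else w :: pvPopB fsS rest

def getValuesField_alt (data : List String) (fieldSelected : String) (fieldsSelected : String) : List String :=
  pvPopB fieldsSelected (pvSeekB fieldSelected data)

-- ===== PRECONDITION & SPEC =====
-- a word A's inner scan passes over without returning ("" is where Python A raises; kept, so Pre_ can see it)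
def pvKeep (fsS : String) (w : String) : Bool := !(decide (w ≠ "") && (w.toList.getLast? == some ':' || w == fsS))

-- Pre_ excludes exactly the inputs on which Python A raises IndexError:
-- an empty word occurring after the first marker occurrence and before any stopper.
def Pre_getValuesField (data : List String) (fieldSelected : String) (fieldsSelected : String) : Prop :=
  ((PySem.List.index? data fieldSelected).all
    (fun i => !((data.drop (i + 1)).takeWhile (pvKeep fieldsSelected)).contains "")) = true
instance (data : List String) (fieldSelected : String) (fieldsSelected : String) : Decidable (Pre_getValuesField data fieldSelected fieldsSelected) := by unfold Pre_getValuesField; infer_instance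

def pvWitness_getValuesField : List String × String × String :=
  (["name:", "John", "Smith", "age:"], "name:", "age:")

def Spec_getValuesField (data : List String) (fieldSelected : String) (fieldsSelected : String) (out : List String) : Prop := out = getValuesField_alt data fieldSelected fieldsSelected
instance (data : List String) (fieldSelected : String) (fieldsSelected : String) (out : List String) : Decidable (Spec_getValuesField data fieldSelected fieldsSelected out) := by unfold Spec_getValuesField; infer_instance

-- ===== CLAIM (what is proved, stated in full; the proofs are below) =====
def Claim_equal_getValuesField : Prop := ∀ (data : List String) (fieldSelected : String) (fieldsSelected : String), Dom_getValuesField data fieldSelected fieldsSelected → Pre_getValuesField data fieldSelected fieldsSelected → Spec_getValuesField data fieldSelected fieldsSelected (getValuesField data fieldSelected fieldsSelected)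

-- ===== LEMMAS AND PROOFS =====

theorem pvLast_some (w : String) (hw : w ≠ "") : ∃ c, w.toList.getLast? = some c := by
  have h : w.toList ≠ [] := by simpa using hw
  rcases hl : w.toList.getLast? with _ | c
  · exact absurd (List.getLast?_eq_none_iff.mp hl) h
  · exact ⟨c, rfl⟩

-- endswith(':') is exactly "last char is ':'"
theorem pvEndswith_colon (l : List Char) :
    PySem.Chars.endswith l [':'] = (l.getLast? == some ':') := by
  refine Bool.eq_iff_iff.mpr ?_
  rw [PySem.Chars.endswith_iff]
  constructor
  · rintro ⟨t, rfl⟩; simp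
  · intro h
    rcases List.getLast?_eq_some_iff.mp (beq_iff_eq.mp h) with ⟨t, rfl⟩
    exact ⟨t, rfl⟩

theorem pvGoA_true (fS fsS : String) (l : List String) (acc : List String)
    (h : "" ∉ l.takeWhile (pvKeep fsS)) :
    pvGoA fS fsS l true acc = acc ++ pvPopB fsS l := by
  induction l generalizing acc with
  | nil => simp [pvGoA, pvPopB]
  | cons w rest ih =>
    by_cases hw : w = ""
    · subst hw
      exact absurd (by simp [List.takeWhile, pvKeep]) h
    · obtain ⟨c, hl⟩ := pvLast_some w hw
      have hend := pvEndswith_colon w.toList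
      rw [hl] at hend
      by_cases hc : c = ':'
      · subst hc
        simp [pvGoA, pvPopB, PySem.List.pyGet?_neg_one, hl, hend]
      · by_cases hfs : w = fsS
        · subst hfs
          simp [pvGoA, pvPopB, PySem.List.pyGet?_neg_one, hl, hend, hc]
        · have hkeep : pvKeep fsS w = true := by
            simp [pvKeep, hl, hc, hfs, hw]
          have hrest : "" ∉ rest.takeWhile (pvKeep fsS) := by
            intro hmem; exact h (by simp [List.takeWhile, hkeep, hmem])
          have hih := ih (acc ++ [w]) hrest
          simp [pvGoA, pvPopB, PySem.List.pyGet?_neg_one, hl, hc, hfs, hend]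
          simpa using hih

theorem pvGoA_false (fS fsS : String) (l : List String)
    (h : ((PySem.List.index? l fS).all
      (fun i => !((l.drop (i + 1)).takeWhile (pvKeep fsS)).contains "")) = true) :
    pvGoA fS fsS l false [] = getValuesField_alt l fS fsS := by
  induction l with
  | nil =>
    rw [getValuesField_alt]
    simp [pvGoA, pvSeekB, pvPopB]
  | cons w rest ih =>
    by_cases hwf : w = fS
    · subst hwf
      have hidx : PySem.List.index? (w :: rest) w = some 0 := PySem.List.index?_cons_self w rest
      rw [hidx] at h
      simp only [Option.all_some, List.drop_succ_cons, List.drop_zero] at h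
      have hrest : "" ∉ rest.takeWhile (pvKeep fsS) := by simpa using h
      rw [getValuesField_alt]
      have hseek : pvSeekB w (w :: rest) = rest := by simp [pvSeekB]
      rw [hseek]
      have hstep : pvGoA w fsS (w :: rest) false [] = pvGoA w fsS rest true [] := by
        simp [pvGoA]
      rw [hstep]
      simpa using pvGoA_true w fsS rest [] hrest
    · have hidx := PySem.List.index?_cons_of_ne (x := w) (v := fS) rest hwf
      rw [getValuesField_alt]
      have hseek : pvSeekB fS (w :: rest) = pvSeekB fS rest := by simp [pvSeekB, hwf]
      rw [hseek]
      rw [hidx] at h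
      have hstep : pvGoA fS fsS (w :: rest) false [] = pvGoA fS fsS rest false [] := by
        simp [pvGoA, hwf]
      rw [hstep]
      rcases hrest : PySem.List.index? rest fS with _ | i
      · rw [ih (by rw [hrest]; rfl)]
        rw [getValuesField_alt]
      · rw [hrest] at h
        simp only [Option.map_some, Option.all_some] at h
        have h' : ((PySem.List.index? rest fS).all
            (fun j => !((rest.drop (j + 1)).takeWhile (pvKeep fsS)).contains "")) = true := by
          rw [hrest]; simpa using h
        rw [ih h', getValuesField_alt]

-- ===== VERDICT (by name: the statement is the Claim_ definition above) =====
theorem getValuesField_spec : Claim_equal_getValuesField := by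
  intro data fS fsS _ hpre
  unfold Spec_getValuesField getValuesField
  exact pvGoA_false fS fsS data hpre
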